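-- pv_equiv track=rewrite | github.com/UIUCLearningLanguageLab/Childesplus | src/basic_dataset.py | create_sequence_lists
-- ===== SOURCE A (Python) =====
-- def create_sequence_lists(index_list, sequence_length, pad_index):
--     if sequence_length == 2:
--         # Each sequence is a single element from the index_list
--         return [[index] for index in index_list]
--     else:
--         # Original logic for longer sequences
--         padded_list = [pad_index] * (sequence_length - 2) + index_list
--         sequence_lists = []
--         for i in range(len(padded_list) + 1):
--             if i + sequence_length <= len(padded_list):
--                 sequence = padded_list[i:i + sequence_length]
--                 sequence_lists.append(sequence)
--         return sequence_lists
-- ===== SOURCE B (Python) =====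
-- def create_sequence_lists(index_list, sequence_length, pad_index):
--     if sequence_length == 2:
--         return [[index] for index in index_list]
--     padded_list = [pad_index] * (sequence_length - 2) + index_list
--     # single streaming pass: grow a window; each time it reaches the target
--     # length, emit a copy and slide it by dropping its first element
--     window = []
--     sequence_lists = []
--     for x in padded_list:
--         window.append(x)
--         if len(window) == sequence_length:
--             sequence_lists.append(list(window))
--             window.pop(0)
--     return sequence_lists
-- ===== Notes on version B (the rewrite author's own statement) =====
-- stated objective: alternative
-- what changed: B replaces A's index-range loop with per-index slicing by a single streaming pass that grows a window and, each time it reaches the target length, emits a copy and slides it by dropping its first element.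
-- intended difference: For sequence_length <= 0 (a meaningless window size) A returns one garbage entry per start index passing the i+L<=len test (at least one empty list, and truncated windows via Python's negative-stop slicing on longer lists), while B returns [], the intended empty set of windows. — e.g. on create_sequence_lists([1], 0, 9): A returns [[], []], B returns []
import Mathlib
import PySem

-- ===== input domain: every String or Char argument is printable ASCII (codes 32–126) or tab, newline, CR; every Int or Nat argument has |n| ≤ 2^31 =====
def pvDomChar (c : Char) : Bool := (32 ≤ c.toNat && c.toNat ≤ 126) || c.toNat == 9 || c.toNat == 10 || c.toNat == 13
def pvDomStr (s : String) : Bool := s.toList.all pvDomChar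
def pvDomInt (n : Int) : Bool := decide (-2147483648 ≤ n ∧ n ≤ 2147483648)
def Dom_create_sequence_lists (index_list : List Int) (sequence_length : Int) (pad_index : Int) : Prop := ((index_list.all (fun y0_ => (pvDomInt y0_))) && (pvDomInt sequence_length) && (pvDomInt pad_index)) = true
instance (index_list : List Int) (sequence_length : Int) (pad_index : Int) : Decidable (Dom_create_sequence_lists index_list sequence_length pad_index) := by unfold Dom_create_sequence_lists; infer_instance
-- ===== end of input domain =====

-- B builds the windows in one streaming pass over the padded list (grow a window, emit and
-- slide when it reaches the target length) instead of slicing at every index of a range loop;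
-- same cost, different algorithm ("alternative").

-- ===== PORT A =====
def create_sequence_lists (index_list : List Int) (sequence_length : Int) (pad_index : Int) : List (List Int) :=
  if sequence_length = 2 then
    index_list.map (fun index => [index])
  else
    let padded_list := PySem.List.pyRepeat [pad_index] (sequence_length - 2) ++ index_list
    (PySem.List.pyRange 0 ((padded_list.length : Int) + 1) 1).foldl
      (fun sequence_lists i =>
        if i + sequence_length ≤ (padded_list.length : Int) then
          sequence_lists ++ [PySem.List.slice padded_list (some i) (some (i + sequence_length))]
        else sequence_lists) []

-- ===== PORT B =====
def create_sequence_lists_alt (index_list : List Int) (sequence_length : Int) (pad_index : Int) : List (List Int) :=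
  if sequence_length = 2 then
    index_list.map (fun index => [index])
  else
    let padded_list := PySem.List.pyRepeat [pad_index] (sequence_length - 2) ++ index_list
    (padded_list.foldl
      (fun st x =>
        if ((st.1 ++ [x]).length : Int) = sequence_length then
          ((st.1 ++ [x]).drop 1, st.2 ++ [st.1 ++ [x]])
        else (st.1 ++ [x], st.2))
      (([] : List Int), ([] : List (List Int)))).2

-- ===== PRECONDITION & SPEC =====
-- For sequence_length ≤ 0 (a meaningless window size) A returns garbage — at least one empty
-- "window" for every start index that passes the i + L ≤ len test (and, via Python's
-- negative-stop slicing, truncated windows on long lists) — whereas B returns the intended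
-- empty list of windows.
def D_create_sequence_lists (index_list : List Int) (sequence_length : Int) (pad_index : Int) : Prop :=
  sequence_length ≤ 0
instance (index_list : List Int) (sequence_length : Int) (pad_index : Int) : Decidable (D_create_sequence_lists index_list sequence_length pad_index) := by unfold D_create_sequence_lists; infer_instance

def Spec_create_sequence_lists (index_list : List Int) (sequence_length : Int) (pad_index : Int) (out : List (List Int)) : Prop := ¬ D_create_sequence_lists index_list sequence_length pad_index → out = create_sequence_lists_alt index_list sequence_length pad_index
instance (index_list : List Int) (sequence_length : Int) (pad_index : Int) (out : List (List Int)) : Decidable (Spec_create_sequence_lists index_list sequence_length pad_index out) := by unfold Spec_create_sequence_lists; infer_instance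

def pvDiffWitness_create_sequence_lists : List Int × Int × Int := ([1], 0, 9)
def pvDiffWitnessOut_create_sequence_lists : (List (List Int)) × (List (List Int)) := ([[], []], [])

-- ===== CLAIM (what is proved, stated in full; the proofs are below) =====
def Claim_unchanged_create_sequence_lists : Prop := ∀ (index_list : List Int) (sequence_length : Int) (pad_index : Int), Dom_create_sequence_lists index_list sequence_length pad_index → Spec_create_sequence_lists index_list sequence_length pad_index (create_sequence_lists index_list sequence_length pad_index)
def Claim_changed_create_sequence_lists : Prop := Dom_create_sequence_lists (pvDiffWitness_create_sequence_lists.1) (pvDiffWitness_create_sequence_lists.2.1) (pvDiffWitness_create_sequence_lists.2.2) ∧ D_create_sequence_lists (pvDiffWitness_create_sequence_lists.1) (pvDiffWitness_create_sequence_lists.2.1) (pvDiffWitness_create_sequence_lists.2.2) ∧ create_sequence_lists (pvDiffWitness_create_sequence_lists.1) (pvDiffWitness_create_sequence_lists.2.1) (pvDiffWitness_create_sequence_lists.2.2) = pvDiffWitnessOut_create_sequence_lists.1 ∧ create_sequence_lists_alt (pvDiffWitness_create_sequence_lists.1) (pvDiffWitness_create_sequence_lists.2.1) (pvDiffWitness_create_sequence_lists.2.2)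 = pvDiffWitnessOut_create_sequence_lists.2 ∧ pvDiffWitnessOut_create_sequence_lists.1 ≠ pvDiffWitnessOut_create_sequence_lists.2
def Claim_exact_create_sequence_lists : Prop := ∀ (index_list : List Int) (sequence_length : Int) (pad_index : Int), Dom_create_sequence_lists index_list sequence_length pad_index → D_create_sequence_lists index_list sequence_length pad_index → create_sequence_lists index_list sequence_length pad_index ≠ create_sequence_lists_alt index_list sequence_length pad_index

-- ===== LEMMAS AND PROOFS =====

-- canonical sliding-window function both ports are reduced to (used with k ≥ 1)
def windows (xs : List Int) (k : Nat) : List (List Int) :=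
  if h : k = 0 ∨ xs.length < k then [] else xs.take k :: windows xs.tail k
termination_by xs.length
decreasing_by
  push_neg at h
  obtain ⟨h1, h2⟩ := h
  cases xs with
  | nil => simp at h2; omega
  | cons a t => simp

theorem windows_eq_map_range (xs : List Int) (k : Nat) (hk : 1 ≤ k) :
    windows xs k = (List.range (xs.length + 1 - k)).map (fun i => (xs.drop i).take k) := by
  induction xs with
  | nil =>
    have hw : windows [] k = [] := by
      rw [windows]; exact dif_pos (Or.inr (by simpa using hk))
    rw [hw]
    simp [Nat.sub_eq_zero_of_le hk]
  | cons a t ih =>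
    by_cases hlen : (a :: t).length < k
    · have hw : windows (a :: t) k = [] := by
        rw [windows]; exact dif_pos (Or.inr hlen)
      have h0 : (a :: t).length + 1 - k = 0 := by omega
      rw [hw, h0]
      simp
    · push_neg at hlen
      rw [windows, dif_neg (by omega)]
      have hm : (a :: t).length + 1 - k = (t.length + 1 - k) + 1 := by
        simp only [List.length_cons] at hlen ⊢
        omega
      rw [hm, List.range_succ_eq_map, List.map_cons, List.map_map]
      congr 1

theorem filter_range_lt (c m : Nat) (h : c ≤ m) :
    (List.range m).filter (fun j => decide (j < c)) = List.range c := by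
  induction m with
  | zero =>
    have : c = 0 := by omega
    subst this; simp
  | succ n ih =>
    rw [List.range_succ, List.filter_append]
    by_cases hc : c = n + 1
    · subst hc
      rw [List.filter_eq_self.2 (by intro a ha; simp at ha ⊢; omega), List.range_succ]
      simp
    · rw [ih (by omega)]
      simp only [List.filter_cons, List.filter_nil]
      rw [if_neg (by simp; omega)]
      simp

-- A's range-and-slice loop computes the canonical windows (for window length ≥ 1)
theorem portA_windows (xs : List Int) (L : Int) (hL : 1 ≤ L) :
    (PySem.List.pyRange 0 ((xs.length : Int) + 1) 1).foldl
      (fun acc i => if i + L ≤ (xs.length : Int) then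
          acc ++ [PySem.List.slice xs (some i) (some (i + L))] else acc) []
      = windows xs L.toNat := by
  set k := L.toNat with hk
  have hLk : L = (k : Int) := by omega
  rw [PySem.List.foldl_append_ite (fun i => i + L ≤ (xs.length : Int))
    (fun i => PySem.List.slice xs (some i) (some (i + L)))]
  rw [List.nil_append]
  have hcast : ((xs.length : Int) + 1) = ((xs.length + 1 : Nat) : Int) := by push_cast; ring
  rw [hcast, PySem.List.pyRange_zero_nat, List.filter_map, List.map_map]
  have hfil : (List.range (xs.length + 1)).filter
      ((fun i => decide (i + L ≤ (xs.length : Int))) ∘ (fun j : Nat => (j : Int)))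
      = List.range (xs.length + 1 - k) := by
    rw [← filter_range_lt (xs.length + 1 - k) (xs.length + 1) (by omega)]
    apply List.filter_congr
    intro j hj
    simp only [Function.comp, decide_eq_decide]
    omega
  rw [hfil, windows_eq_map_range xs k (by omega)]
  apply List.map_congr_left
  intro j _
  simp only [Function.comp]
  rw [hLk, PySem.List.slice_natCast_add]

-- B's streaming pass computes the canonical windows (for window length ≥ 1):
-- invariant: the window is always shorter than the target, and the emitted windows so far
-- are exactly the windows of (current window ++ remaining input)
theorem foldB_windows (L : Int) (k : Nat) (hk : 1 ≤ k) (hLk : L = (k : Int)) :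
    ∀ (xs w : List Int) (out : List (List Int)), w.length + 1 ≤ k →
      (xs.foldl
        (fun st x =>
          if ((st.1 ++ [x]).length : Int) = L then
            ((st.1 ++ [x]).drop 1, st.2 ++ [st.1 ++ [x]])
          else (st.1 ++ [x], st.2))
        (w, out)).2 = out ++ windows (w ++ xs) k := by
  intro xs
  induction xs with
  | nil =>
    intro w out hw
    have hwin : windows (w ++ []) k = [] := by
      rw [windows]
      exact dif_pos (Or.inr (by simp; omega))
    rw [hwin]
    simp
  | cons x rest ih =>
    intro w out hw
    simp only [List.foldl_cons]
    by_cases hw' : (w ++ [x]).length = k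
    · rw [if_pos (by rw [hLk]; exact_mod_cast hw')]
      rw [ih ((w ++ [x]).drop 1) (out ++ [w ++ [x]]) (by simp at hw' ⊢; omega)]
      have hsplit : windows (w ++ x :: rest) k = (w ++ [x]) :: windows ((w ++ [x]).drop 1 ++ rest) k := by
        rw [windows, dif_neg (by simp at hw' ⊢; omega)]
        congr 1
        · -- head window is the full buffer
          have hk' : k = w.length + 1 := by simp at hw'; omega
          rw [hk', List.take_append]
          simp
        · -- sliding the buffer = taking the tail of the whole list
          have hmerge : w ++ x :: rest = (w ++ [x]) ++ rest := by simp
          rw [hmerge, ← List.drop_one, List.drop_append_of_le_length (by simp)]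
      rw [hsplit]
      simp
    · rw [if_neg (by rw [hLk]; exact_mod_cast hw')]
      rw [ih (w ++ [x]) out (by simp at hw' ⊢; omega)]
      congr 2
      simp

-- with a nonpositive target length the window never reaches it, so nothing is ever emitted
theorem foldB_low (L : Int) (hL : L ≤ 0) :
    ∀ (xs w : List Int) (out : List (List Int)),
      (xs.foldl
        (fun st x =>
          if ((st.1 ++ [x]).length : Int) = L then
            ((st.1 ++ [x]).drop 1, st.2 ++ [st.1 ++ [x]])
          else (st.1 ++ [x], st.2))
        (w, out)).2 = out := by
  intro xs
  induction xs with
  | nil => intro w out; rfl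
  | cons x rest ih =>
    intro w out
    simp only [List.foldl_cons]
    rw [if_neg (by simp; omega)]
    exact ih (w ++ [x]) out

theorem portB_windows (xs : List Int) (L : Int) (hL : 1 ≤ L) :
    (xs.foldl
      (fun st x =>
        if ((st.1 ++ [x]).length : Int) = L then
          ((st.1 ++ [x]).drop 1, st.2 ++ [st.1 ++ [x]])
        else (st.1 ++ [x], st.2))
      (([] : List Int), ([] : List (List Int)))).2 = windows xs L.toNat := by
  have hk : 1 ≤ L.toNat := by omega
  rw [foldB_windows L L.toNat hk (by omega) xs [] [] (by simp; omega)]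
  simp

-- ===== VERDICT (by name: the statement is the Claim_ definition above) =====
theorem create_sequence_lists_spec : Claim_unchanged_create_sequence_lists := by
  intro il L pad _hDom
  unfold Spec_create_sequence_lists D_create_sequence_lists
  intro hD
  push_neg at hD
  by_cases h2 : L = 2
  · simp [create_sequence_lists, create_sequence_lists_alt, h2]
  · unfold create_sequence_lists create_sequence_lists_alt
    rw [if_neg h2, if_neg h2]
    exact (portA_windows _ L (by omega)).trans (portB_windows _ L (by omega)).symm

theorem create_sequence_lists_changed : Claim_changed_create_sequence_lists := by
  unfold Claim_changed_create_sequence_lists; decide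

theorem create_sequence_lists_tight : Claim_exact_create_sequence_lists := by
  intro il L pad _hDom hD
  unfold D_create_sequence_lists at hD
  have h2 : L ≠ 2 := by omega
  unfold create_sequence_lists create_sequence_lists_alt
  rw [if_neg h2, if_neg h2]
  intro heq
  set xs := PySem.List.pyRepeat [pad] (L - 2) ++ il with hxs
  rw [PySem.List.foldl_append_ite (fun i => i + L ≤ (xs.length : Int))
    (fun i => PySem.List.slice xs (some i) (some (i + L))), List.nil_append] at heq
  rw [foldB_low L hD xs [] []] at heq
  have hmem : (0 : Int) ∈ (PySem.List.pyRange 0 ((xs.length : Int) + 1) 1).filter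
      (fun i => decide (i + L ≤ (xs.length : Int))) := by
    rw [List.mem_filter]
    constructor
    · rw [PySem.List.mem_pyRange_one]
      omega
    · simp; omega
  have hmem2 : PySem.List.slice xs (some 0) (some (0 + L)) ∈
      ((PySem.List.pyRange 0 ((xs.length : Int) + 1) 1).filter
        (fun i => decide (i + L ≤ (xs.length : Int)))).map
        (fun i => PySem.List.slice xs (some i) (some (i + L))) :=
    List.mem_map_of_mem hmem
  rw [heq] at hmem2
  simp at hmem2
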